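-- pv_equiv track=rewrite | github.com/SDET-SOLOMAN/code_wars_python | kata_6s/the_most_common_letter.py | replace_common
-- ===== SOURCE A (Python) =====
-- def replace_common(st, letter):
--     x = {k: st.count(k) for k in st if k.isalpha()}
--
--     temp = ("", 0)
--
--     for k, v in x.items():
--         if v > temp[1]:
--             temp = (k, v)
--
--     st = st.replace(temp[0], letter)
--     return st
-- ===== SOURCE B (Python) =====
-- def replace_common(st, letter):
--     counts = {}
--     for c in st:
--         if c.isalpha():
--             counts[c] = counts.get(c, 0) + 1
--     ranked = sorted(counts.items(), key=lambda kv: -kv[1])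
--     target = ranked[0][0] if ranked else ""
--     return st.replace(target, letter)
-- ===== Notes on version B (the rewrite author's own statement) =====
-- stated objective: alternative
-- what changed: B counts alpha characters in a single incremental dict pass instead of calling st.count for every character occurrence, and picks the target as the head of a stable sort of the frequency entries by descending count instead of A's running strict-max scan.
import Mathlib
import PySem

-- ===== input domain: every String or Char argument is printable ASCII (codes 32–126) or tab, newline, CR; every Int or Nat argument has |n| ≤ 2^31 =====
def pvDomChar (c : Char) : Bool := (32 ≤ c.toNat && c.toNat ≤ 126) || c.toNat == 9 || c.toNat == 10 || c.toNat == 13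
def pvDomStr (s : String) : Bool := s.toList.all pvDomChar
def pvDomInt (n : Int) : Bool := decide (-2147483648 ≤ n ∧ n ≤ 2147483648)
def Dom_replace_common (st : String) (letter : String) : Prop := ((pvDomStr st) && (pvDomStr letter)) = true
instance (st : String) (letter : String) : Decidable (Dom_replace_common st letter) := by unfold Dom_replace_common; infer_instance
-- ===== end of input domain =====

-- B replaces A's per-character full-string st.count rescans and running-max scan by a one-pass
-- frequency dict plus a stable sort ranked by descending count (objective: alternative).

-- ===== PORT A =====
def replace_common (st : String) (letter : String) : String :=
  let x : PySem.Dict Char Int :=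
    st.toList.foldl
      (fun d k => if PySem.Chars.isalpha k then d.insert k ((PySem.Str.count st (String.ofList [k]) : Int)) else d)
      PySem.Dict.empty
  let temp : String × Int :=
    x.items.foldl (fun t kv => if kv.2 > t.2 then (String.ofList [kv.1], kv.2) else t) ("", 0)
  PySem.Str.replace st temp.1 letter

-- ===== PORT B =====
def replace_common_alt (st : String) (letter : String) : String :=
  let counts : PySem.Dict Char Int :=
    st.toList.foldl
      (fun d c => if PySem.Chars.isalpha c then d.modify c 0 (· + 1) else d)
      PySem.Dict.empty
  let ranked := PySem.List.sorted counts.items (fun kv => (-kv.2 : Int)) false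
  let target : String :=
    match ranked with
    | [] => ""
    | kv :: _ => String.ofList [kv.1]
  PySem.Str.replace st target letter

-- ===== PRECONDITION & SPEC =====
def Spec_replace_common (st : String) (letter : String) (out : String) : Prop := out = replace_common_alt st letter
instance (st : String) (letter : String) (out : String) : Decidable (Spec_replace_common st letter out) := by unfold Spec_replace_common; infer_instance

-- ===== CLAIM (what is proved, stated in full; the proofs are below) =====
def Claim_equal_replace_common : Prop := ∀ (st : String) (letter : String), Dom_replace_common st letter → Spec_replace_common st letter (replace_common st letter)

-- ===== LEMMAS AND PROOFS =====

-- s.count(c) for a one-character needle counts occurrences of that character (specific to A's use of str.count)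
theorem go_single (c : Char) : ∀ (s : List Char) (fuel acc : Nat), s.length ≤ fuel →
    PySem.Chars.count.go [c] fuel s acc = acc + s.count c := by
  intro s
  induction s with
  | nil => intro fuel acc _; cases fuel <;> simp [PySem.Chars.count.go]
  | cons h t ih =>
    intro fuel acc hf
    cases fuel with
    | zero => simp at hf
    | succ f =>
      have ht : t.length ≤ f := by simpa using hf
      by_cases hc : c = h
      · subst hc
        rw [show PySem.Chars.count.go [c] (f+1) (c :: t) acc
             = PySem.Chars.count.go [c] f t (acc + 1) by
              simp [PySem.Chars.count.go, List.isPrefixOf]]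
        rw [ih f (acc + 1) ht, List.count_cons]
        simp; omega
      · rw [show PySem.Chars.count.go [c] (f+1) (h :: t) acc
             = PySem.Chars.count.go [c] f t acc by
              simp [PySem.Chars.count.go, List.isPrefixOf, hc]]
        rw [ih f acc ht, List.count_cons]
        have : ¬ h = c := fun e => hc e.symm
        simp [this]

theorem count_single (s : List Char) (c : Char) : PySem.Chars.count s [c] = s.count c := by
  simp [PySem.Chars.count, go_single c s s.length 0 le_rfl]

-- a dict with nodup keys is its keys paired with its lookups
theorem items_eq_keys_map {ν : Type} (d : PySem.Dict Char ν) (d0 : ν) (h : d.keys.Nodup) :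
    d.items = d.keys.map (fun k => (k, d.getD k d0)) := by
  have hid : d.items.map (fun kv => (kv.1, d.getD kv.1 d0)) = d.items := by
    conv_rhs => rw [← List.map_id d.items]
    apply List.map_congr_left
    intro kv hkv
    have := PySem.Dict.getD_of_mem_items d (k := kv.1) (v := kv.2) (by simpa using hkv) h d0
    simp [this]
  calc d.items = d.items.map (fun kv => (kv.1, d.getD kv.1 d0)) := hid.symm
    _ = d.keys.map (fun k => (k, d.getD k d0)) := by
        simp [PySem.Dict.keys, List.map_map, Function.comp_def]

theorem keys_insert_eq (d : PySem.Dict Char Int) (k : Char) (v : Int) :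
    (d.insert k v).keys = PySem.Set.add d.keys k := by
  rcases hC : d.contains k with _ | _
  · have hk : k ∉ d.keys := by
      rw [PySem.Dict.contains_eq_decide_mem_keys] at hC; simpa using hC
    simp [PySem.Dict.keys, PySem.Dict.items_insert, hC, PySem.Set.add, List.contains_eq_mem]
    intro x hx
    exact hk (by simpa [PySem.Dict.keys] using List.mem_map_of_mem (f := Prod.fst) hx)
  · have hk : k ∈ d.keys := by
      rw [PySem.Dict.contains_eq_decide_mem_keys] at hC; simpa using hC
    have hc2 : (List.map (fun x => x.1) d.items).contains k = true := by
      simpa [PySem.Dict.keys, List.contains_eq_mem] using hk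
    simp [PySem.Dict.keys, PySem.Dict.items_insert, hC, PySem.Set.add]
    rw [if_pos hc2]
    apply List.map_congr_left
    intro a _
    by_cases h : a.1 = k <;> simp [h]

-- keys of A's comprehension fold
theorem afold_keys (p : Char → Bool) (f : Char → Int) :
    ∀ (xs : List Char) (d : PySem.Dict Char Int),
      (xs.foldl (fun d k => if p k then d.insert k (f k) else d) d).keys
        = (xs.filter p).foldl PySem.Set.add d.keys := by
  intro xs
  induction xs with
  | nil => intro d; simp
  | cons x xs ih =>
    intro d
    by_cases hp : p x
    · simp [hp, ih, keys_insert_eq]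
    · simp [hp, ih]

-- lookups of A's comprehension fold
theorem afold_getD (p : Char → Bool) (f : Char → Int) (k : Char) :
    ∀ (xs : List Char) (d : PySem.Dict Char Int),
      (xs.foldl (fun d k => if p k then d.insert k (f k) else d) d).getD k 0
        = if p k = true ∧ k ∈ xs then f k else d.getD k 0 := by
  intro xs
  induction xs with
  | nil => intro d; simp
  | cons x xs ih =>
    intro d
    by_cases hp : p x
    · rw [List.foldl_cons, if_pos hp, ih, PySem.Dict.getD_insert]
      by_cases hk : k = x
      · subst hk; by_cases hm : k ∈ xs <;> simp [hm, hp]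
      · by_cases hm : p k = true ∧ k ∈ xs <;> simp [hk, hm]
    · rw [List.foldl_cons, if_neg hp, ih]
      by_cases hk : k = x
      · subst hk; by_cases hm : k ∈ xs <;> simp [hm, hp]
      · by_cases hm : p k = true ∧ k ∈ xs <;> simp [hk, hm]

-- head of the insertion-sort fold = running first-strict-min of the key
theorem head_foldl_insertBy {α : Type} (before : α → α → Bool) :
    ∀ (xs : List α) (m : α) (acc : List α),
      (xs.foldl (fun a x => PySem.List.insertBy before x a) (m :: acc)).head?
        = some (xs.foldl (fun m x => if before x m then x else m) m) := by
  intro xs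
  induction xs with
  | nil => intro m acc; rfl
  | cons x xs ih =>
    intro m acc
    by_cases hb : before x m
    · simpa [PySem.List.insertBy, hb] using ih x (m :: acc)
    · simpa [PySem.List.insertBy, hb] using ih m (PySem.List.insertBy before x acc)

-- A's running-max loop over string-keyed pairs is the image of the pair-level argmin-of-(-count) loop
theorem afold_pairs :
    ∀ (rest : List (Char × Int)) (m : Char × Int),
      rest.foldl (fun (t : String × Int) kv => if kv.2 > t.2 then (String.ofList [kv.1], kv.2) else t)
        (String.ofList [m.1], m.2)
        = (String.ofList [(rest.foldl (fun m x => if (decide ((-x.2 : Int) < -m.2)) then x else m) m).1],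
           (rest.foldl (fun m x => if (decide ((-x.2 : Int) < -m.2)) then x else m) m).2) := by
  intro rest
  induction rest with
  | nil => intro m; rfl
  | cons kv rest ih =>
    intro m
    by_cases h : kv.2 > m.2
    · simpa [h, show ((-kv.2 : Int) < -m.2) by omega] using ih kv
    · have h2 : ¬ ((-kv.2 : Int) < -m.2) := by omega
      simpa [h, h2] using ih m

-- keys of A's dict
theorem dictA_keys (st : String) :
    (st.toList.foldl
      (fun d k => if PySem.Chars.isalpha k then d.insert k ((PySem.Str.count st (String.ofList [k]) : Int)) else d)
      PySem.Dict.empty).keys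
      = PySem.Set.ofList (st.toList.filter PySem.Chars.isalpha) := by
  rw [afold_keys]
  simp [PySem.Dict.keys_empty, PySem.Set.ofList, PySem.Set.empty]

theorem dictA_nodup (st : String) :
    (st.toList.foldl
      (fun d k => if PySem.Chars.isalpha k then d.insert k ((PySem.Str.count st (String.ofList [k]) : Int)) else d)
      PySem.Dict.empty).keys.Nodup := by
  rw [dictA_keys]; exact PySem.Set.nodup_ofList _

-- the two dicts carry the same items: same keys in first-occurrence order, same total counts
theorem items_agree (st : String) :
    (st.toList.foldl
      (fun d k => if PySem.Chars.isalpha k then d.insert k ((PySem.Str.count st (String.ofList [k]) : Int)) else d)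
      PySem.Dict.empty).items
    = (st.toList.foldl
      (fun d c => if PySem.Chars.isalpha c then d.modify c 0 (· + 1) else d)
      PySem.Dict.empty).items := by
  have hB : (st.toList.foldl
      (fun d c => if PySem.Chars.isalpha c then d.modify c 0 (· + 1) else d)
      PySem.Dict.empty)
      = PySem.Dict.counter (st.toList.filter PySem.Chars.isalpha) := by
    rw [PySem.Dict.counter_eq_foldl, List.foldl_filter]
  rw [items_eq_keys_map _ 0 (dictA_nodup st), items_eq_keys_map _ 0 (by rw [hB]; exact PySem.Dict.nodup_keys_counter _),
    dictA_keys, hB, PySem.Dict.keys_counter]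
  apply List.map_congr_left
  intro k hk
  have hk' : k ∈ st.toList.filter PySem.Chars.isalpha := (PySem.Set.mem_ofList _ _).mp hk
  have hp : PySem.Chars.isalpha k = true := (List.mem_filter.mp hk').2
  have hmem : k ∈ st.toList := (List.mem_filter.mp hk').1
  rw [afold_getD, if_pos ⟨hp, hmem⟩, PySem.Dict.getD_counter]
  rw [PySem.Str.count_eq, show (String.ofList [k]).toList = [k] by simp, count_single,
    List.count_filter hp]

-- every stored count is positive
theorem items_pos (st : String) :
    ∀ kv ∈ (st.toList.foldl
      (fun d k => if PySem.Chars.isalpha k then d.insert k ((PySem.Str.count st (String.ofList [k]) : Int)) else d)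
      PySem.Dict.empty).items, (0 : Int) < kv.2 := by
  intro kv hkv
  rw [items_eq_keys_map _ 0 (dictA_nodup st), dictA_keys] at hkv
  obtain ⟨k, hkmem, rfl⟩ := List.mem_map.mp hkv
  have hk' : k ∈ st.toList.filter PySem.Chars.isalpha := (PySem.Set.mem_ofList _ _).mp hkmem
  have hp : PySem.Chars.isalpha k = true := (List.mem_filter.mp hk').2
  have hmem : k ∈ st.toList := (List.mem_filter.mp hk').1
  simp only
  rw [afold_getD, if_pos ⟨hp, hmem⟩]
  rw [PySem.Str.count_eq, show (String.ofList [k]).toList = [k] by simp, count_single]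
  exact_mod_cast List.count_pos_iff.mpr hmem

-- the selected targets coincide: A's first-strict-max scan vs head of the stable sort by descending count
theorem final_part (L : List (Char × Int)) (hpos : ∀ kv ∈ L, (0 : Int) < kv.2) :
    (L.foldl (fun (t : String × Int) kv => if kv.2 > t.2 then (String.ofList [kv.1], kv.2) else t)
      ("", 0)).1
    = (match PySem.List.sorted L (fun kv => (-kv.2 : Int)) false with
       | [] => ""
       | kv :: _ => String.ofList [kv.1]) := by
  cases L with
  | nil => rfl
  | cons a rest =>
    have ha : (0 : Int) < a.2 := hpos a (by simp)
    have hhead : (PySem.List.sorted (a :: rest) (fun kv : Char × Int => (-kv.2 : Int)) false).head?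
        = some (rest.foldl (fun m x => if (decide ((-x.2 : Int) < -m.2)) then x else m) a) := by
      rw [PySem.List.sorted_eq_foldl_insertBy]
      simp only [List.foldl_cons]
      exact head_foldl_insertBy _ rest a []
    cases hS : PySem.List.sorted (a :: rest) (fun kv : Char × Int => (-kv.2 : Int)) false with
    | nil =>
      exact absurd ((PySem.List.sorted_eq_nil_iff (a :: rest) (fun kv : Char × Int => (-kv.2 : Int)) false).mp hS) (by simp)
    | cons m t =>
      rw [hS] at hhead
      have hm : m = rest.foldl (fun m x => if (decide ((-x.2 : Int) < -m.2)) then x else m) a := by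
        simpa using hhead
      have hap := afold_pairs rest a
      simp only [gt_iff_lt] at hap ⊢
      simp only [List.foldl_cons]
      rw [if_pos (show ((("" : String), (0 : Int)).2 < a.2) from ha), hap, hm]

-- ===== VERDICT (by name: the statement is the Claim_ definition above) =====
theorem replace_common_spec : Claim_equal_replace_common := by
  intro st letter _
  unfold Spec_replace_common replace_common replace_common_alt
  simp only []
  rw [← items_agree st]
  congr 1
  exact final_part _ (items_pos st)
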